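-- pv_equiv track=rewrite | github.com/ChrisHarig/apart-forecasting-tool | backend/app/services/forecast_prediction_sets.py | _validate_prediction_set_consistency
-- ===== SOURCE A (Python) =====
-- def _validate_prediction_set_consistency(rows: list[dict[str, object]]) -> list[dict[str, object]]:
--     keys = ("model_id", "model_name", "country_iso3", "source_id", "metric", "unit")
--     errors = []
--     for key in keys:
--         values = {row.get(key) for row in rows}
--         if len(values) > 1:
--             errors.append({"code": "mixed_prediction_set", "message": f"Prediction CSV contains multiple {key} values."})
--     return errors
-- ===== SOURCE B (Python) =====
-- def _validate_prediction_set_consistency(rows: list[dict[str, object]]) -> list[dict[str, object]]: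
--     keys = ("model_id", "model_name", "country_iso3", "source_id", "metric", "unit")
--     if not rows:
--         return []
--     first = [rows[0].get(key) for key in keys]
--     mixed = [False] * len(keys)
--     for row in rows[1:]:
--         mixed = [m or row.get(key) != f
--                  for m, (key, f) in zip(mixed, zip(keys, first))]
--     return [{"code": "mixed_prediction_set",
--              "message": f"Prediction CSV contains multiple {key} values."}
--             for key, m in zip(keys, mixed) if m]
-- ===== Notes on version B (the rewrite author's own statement) =====
-- stated objective: alternative
-- what changed: Instead of building a set of all values for each of the six keys (six full scans allocating a set each), B records the first row's values once and makes a single pass over the remaining rows updating six mixed flags, then emits errors in key order; same asymptotic cost, different traversal and state.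
import Mathlib
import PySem

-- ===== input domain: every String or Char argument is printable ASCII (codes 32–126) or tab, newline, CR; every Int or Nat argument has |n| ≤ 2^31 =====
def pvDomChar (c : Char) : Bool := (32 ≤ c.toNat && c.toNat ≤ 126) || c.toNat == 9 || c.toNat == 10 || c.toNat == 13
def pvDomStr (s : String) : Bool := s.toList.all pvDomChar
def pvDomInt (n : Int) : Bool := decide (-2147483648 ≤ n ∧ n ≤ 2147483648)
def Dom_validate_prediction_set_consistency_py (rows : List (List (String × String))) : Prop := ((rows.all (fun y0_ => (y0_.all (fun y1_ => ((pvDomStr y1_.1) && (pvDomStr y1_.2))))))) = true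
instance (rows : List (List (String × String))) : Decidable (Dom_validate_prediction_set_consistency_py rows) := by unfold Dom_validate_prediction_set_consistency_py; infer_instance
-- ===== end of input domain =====

-- B replaces A's per-key set construction (six scans, a set each) by one pass over the
-- remaining rows tracking first-seen values and mixed flags; errors still emitted in key order.

-- ===== PORT A =====
def pvKeysA : List String := ["model_id", "model_name", "country_iso3", "source_id", "metric", "unit"]

def validate_prediction_set_consistency_py (rows : List (List (String × String))) : List (List (String × String)) :=
  pvKeysA.foldl (fun errors key =>
    let values := PySem.Set.ofList (rows.map (fun row => (PySem.Dict.mk row).get? key))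
    if 1 < values.length then
      errors ++ [[("code", "mixed_prediction_set"),
                  ("message", "Prediction CSV contains multiple " ++ key ++ " values.")]]
    else errors) []

-- ===== PORT B =====
def pvKeysB : List String := ["model_id", "model_name", "country_iso3", "source_id", "metric", "unit"]

def validate_prediction_set_consistency_py_alt (rows : List (List (String × String))) : List (List (String × String)) :=
  match rows with
  | [] => []
  | r0 :: rest =>
    let first := pvKeysB.map (fun key => (PySem.Dict.mk r0).get? key)
    let mixed0 := List.replicate pvKeysB.length false
    let mixed := rest.foldl (fun mixed row =>
      (mixed.zip (pvKeysB.zip first)).map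
        (fun (p : Bool × String × Option String) =>
          p.1 || ((PySem.Dict.mk row).get? p.2.1 != p.2.2))) mixed0
    (pvKeysB.zip mixed).foldl (fun errors (p : String × Bool) =>
      if p.2 then
        errors ++ [[("code", "mixed_prediction_set"),
                    ("message", "Prediction CSV contains multiple " ++ p.1 ++ " values.")]]
      else errors) []

-- ===== PRECONDITION & SPEC =====
def Spec_validate_prediction_set_consistency_py (rows : List (List (String × String))) (out : List (List (String × String))) : Prop := out = validate_prediction_set_consistency_py_alt rows
instance (rows : List (List (String × String))) (out : List (List (String × String))) : Decidable (Spec_validate_prediction_set_consistency_py rows out) := by unfold Spec_validate_prediction_set_consistency_py; infer_instance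

-- ===== CLAIM (what is proved, stated in full; the proofs are below) =====
def Claim_equal_validate_prediction_set_consistency_py : Prop := ∀ (rows : List (List (String × String))), Dom_validate_prediction_set_consistency_py rows → Spec_validate_prediction_set_consistency_py rows (validate_prediction_set_consistency_py rows)

-- ===== LEMMAS AND PROOFS =====

-- length of a set only grows under foldl add
theorem pv_foldl_add_len_le {α : Type} [BEq α] (l : List α) (s : List α) :
    s.length ≤ (l.foldl PySem.Set.add s).length := by
  induction l generalizing s with
  | nil => simp [List.foldl]
  | cons x t ih =>
    simp only [List.foldl]
    refine le_trans ?_ (ih (PySem.Set.add s x))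
    simp [PySem.Set.add]
    split <;> simp

theorem pv_foldl_add_len_eq {α : Type} [BEq α] (l : List α) (s : List α) :
    (l.foldl PySem.Set.add s).length = s.length ↔ ∀ x ∈ l, s.contains x := by
  induction l generalizing s with
  | nil => simp [List.foldl]
  | cons x t ih =>
    simp only [List.foldl, List.mem_cons]
    by_cases h : s.contains x
    · rw [show PySem.Set.add s x = s by simp [PySem.Set.add, PySem.Set.contains, h]]
      rw [ih]
      constructor
      · intro hall y hy
        rcases hy with rfl | hy
        · exact h
        · exact hall y hy
      · intro hall y hy; exact hall y (Or.inr hy)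
    · rw [show PySem.Set.add s x = s ++ [x] by simp [PySem.Set.add, PySem.Set.contains, h]]
      constructor
      · intro hlen
        have := pv_foldl_add_len_le t (s ++ [x])
        simp at this
        omega
      · intro hall
        exact absurd (hall x (Or.inl rfl)) h

-- A's per-key condition, characterised against the first element
theorem pv_set_card_gt_one {α : Type} [BEq α] [LawfulBEq α] (a : α) (l : List α) :
    (1 < (PySem.Set.ofList (a :: l)).length) ↔ (l.any (fun x => x != a)) = true := by
  have hof : PySem.Set.ofList (a :: l) = l.foldl PySem.Set.add [a] := by
    simp [PySem.Set.ofList_eq_foldl, List.foldl, PySem.Set.add]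
  rw [hof]
  have hle := pv_foldl_add_len_le l [a]
  simp only [List.length_cons, List.length_nil] at hle
  have heq := pv_foldl_add_len_eq l [a]
  simp only [List.length_cons, List.length_nil, List.contains_cons, List.contains_nil,
    Bool.or_false] at heq
  constructor
  · intro h
    by_contra hany
    have : ∀ x ∈ l, (x == a) = true := by
      intro x hx
      by_contra hne
      exact hany (List.any_eq_true.mpr ⟨x, hx, by simp [bne, hne]⟩)
    have h1 := heq.mpr this
    omega
  · intro hany
    rcases List.any_eq_true.mp hany with ⟨x, hx, hne⟩
    rcases Nat.lt_or_ge 1 ((l.foldl PySem.Set.add [a]).length) with h | h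
    · exact h
    · exfalso
      have h1 : (l.foldl PySem.Set.add [a]).length = 1 := le_antisymm h hle
      have := heq.mp h1 x hx
      simp [bne] at hne
      exact hne (by simpa using this)

-- B's single pass over the remaining rows, computed in closed form (state has the six literal slots)
theorem pv_mixed_fold (rest : List (List (String × String)))
    (f1 f2 f3 f4 f5 f6 : Option String) (m1 m2 m3 m4 m5 m6 : Bool) :
    rest.foldl (fun mixed row =>
      (mixed.zip (pvKeysB.zip [f1, f2, f3, f4, f5, f6])).map
        (fun (p : Bool × String × Option String) =>
          p.1 || ((PySem.Dict.mk row).get? p.2.1 != p.2.2))) [m1, m2, m3, m4, m5, m6]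
    = [m1 || rest.any (fun row => (PySem.Dict.mk row).get? "model_id" != f1),
       m2 || rest.any (fun row => (PySem.Dict.mk row).get? "model_name" != f2),
       m3 || rest.any (fun row => (PySem.Dict.mk row).get? "country_iso3" != f3),
       m4 || rest.any (fun row => (PySem.Dict.mk row).get? "source_id" != f4),
       m5 || rest.any (fun row => (PySem.Dict.mk row).get? "metric" != f5),
       m6 || rest.any (fun row => (PySem.Dict.mk row).get? "unit" != f6)] := by
  induction rest generalizing m1 m2 m3 m4 m5 m6 with
  | nil => simp
  | cons r t ih =>
    have hstep : (([m1, m2, m3, m4, m5, m6] : List Bool).zip (pvKeysB.zip [f1, f2, f3, f4, f5, f6])).map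
        (fun (p : Bool × String × Option String) =>
          p.1 || ((PySem.Dict.mk r).get? p.2.1 != p.2.2))
        = [m1 || ((PySem.Dict.mk r).get? "model_id" != f1),
           m2 || ((PySem.Dict.mk r).get? "model_name" != f2),
           m3 || ((PySem.Dict.mk r).get? "country_iso3" != f3),
           m4 || ((PySem.Dict.mk r).get? "source_id" != f4),
           m5 || ((PySem.Dict.mk r).get? "metric" != f5),
           m6 || ((PySem.Dict.mk r).get? "unit" != f6)] := by
      simp [pvKeysB]
    simp only [List.foldl_cons]
    rw [hstep, ih]
    simp [List.any_cons, Bool.or_assoc]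

-- ===== VERDICT (by name: the statement is the Claim_ definition above) =====
theorem validate_prediction_set_consistency_py_spec : Claim_equal_validate_prediction_set_consistency_py := by
  unfold Claim_equal_validate_prediction_set_consistency_py
  intro rows _
  unfold Spec_validate_prediction_set_consistency_py
  cases rows with
  | nil => decide
  | cons r0 rest =>
    show validate_prediction_set_consistency_py (r0 :: rest)
        = validate_prediction_set_consistency_py_alt (r0 :: rest)
    unfold validate_prediction_set_consistency_py_alt
    simp only [pvKeysB, List.map, List.length_cons, List.length_nil, List.replicate]
    rw [show ((["model_id", "model_name", "country_iso3", "source_id", "metric", "unit"] : List String).zip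
      [(PySem.Dict.mk r0).get? "model_id", (PySem.Dict.mk r0).get? "model_name",
       (PySem.Dict.mk r0).get? "country_iso3", (PySem.Dict.mk r0).get? "source_id",
       (PySem.Dict.mk r0).get? "metric", (PySem.Dict.mk r0).get? "unit"]) = pvKeysB.zip
      [(PySem.Dict.mk r0).get? "model_id", (PySem.Dict.mk r0).get? "model_name",
       (PySem.Dict.mk r0).get? "country_iso3", (PySem.Dict.mk r0).get? "source_id",
       (PySem.Dict.mk r0).get? "metric", (PySem.Dict.mk r0).get? "unit"] from by rw [pvKeysB]]
    rw [pv_mixed_fold]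
    unfold validate_prediction_set_consistency_py
    simp only [pvKeysA, List.foldl, List.map_cons, pv_set_card_gt_one,
      List.any_map, Function.comp_def, List.zip, List.zipWith, Bool.false_or]
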